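-- pv_equiv track=rewrite | github.com/upesacm/100DaysOfCode-2025 | Quiz_7/RaghavSinghal-590012854/Quiz_7_Debugging_Question_1.py | is_queue_palindrome
-- ===== SOURCE A (Python) =====
-- def is_queue_palindrome(queue):
--     stack = []
--     temp_queue = queue.copy()
--
--     # Push all elements into stack
--     for element in temp_queue:
--         stack.append(element)
--
--     # Compare temp_queue and stack
--     for element in temp_queue:
--         if element != stack.pop():
--             return False
--
--     return True
-- ===== SOURCE B (Python) =====
-- def is_queue_palindrome(queue):
--     seq = queue.copy()
--     i, j = 0, len(seq) - 1
--     while i < j: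
--         if seq[i] != seq[j]:
--             return False
--         i += 1
--         j -= 1
--     return True
-- ===== Notes on version B (the rewrite author's own statement) =====
-- stated objective: alternative
-- what changed: Replaces the push-all-then-pop stack comparison (which always builds a full stack and compares all n positions) with a two-pointer converging index scan that maintains no stack, compares at most n/2 pairs and short-circuits on the first mismatch.
import Mathlib
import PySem

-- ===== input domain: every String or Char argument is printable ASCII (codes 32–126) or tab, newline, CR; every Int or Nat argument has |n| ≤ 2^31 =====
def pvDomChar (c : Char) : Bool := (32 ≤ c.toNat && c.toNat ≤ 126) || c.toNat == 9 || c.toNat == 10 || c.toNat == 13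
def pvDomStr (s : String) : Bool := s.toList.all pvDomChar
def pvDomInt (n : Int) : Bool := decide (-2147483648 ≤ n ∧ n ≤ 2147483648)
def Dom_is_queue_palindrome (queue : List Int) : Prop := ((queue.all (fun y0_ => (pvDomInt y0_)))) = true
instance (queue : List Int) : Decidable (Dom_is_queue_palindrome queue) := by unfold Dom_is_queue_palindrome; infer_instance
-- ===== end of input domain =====

-- B is simpler: a two-pointer converging scan (compare seq[i] and seq[j], move both inward,
-- short-circuit on mismatch) instead of building a stack and popping through all n positions;
-- return value only (neither program mutates its input).

-- ===== PORT A =====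
-- second for-loop of A: compare each element with stack.pop()
def pvAClimb : List Int → List Int → Bool
  | [], _stack => true
  | x :: xs, stack =>
    match PySem.List.pop? stack (-1) with
    | some r => if x ≠ r.1 then false else pvAClimb xs r.2
    | none => false   -- Python IndexError; unreachable: the stack holds as many elements as remain

def is_queue_palindrome (queue : List Int) : Bool :=
  let temp_queue := queue   -- queue.copy()
  let stack := temp_queue.foldl (fun s e => s ++ [e]) []   -- push all elements into stack
  pvAClimb temp_queue stack

-- ===== PORT B =====
-- i, j = 0, len(seq)-1; while i < j: compare seq[i] with seq[j]; i += 1; j -= 1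
def pvTwoPtr (seq : List Int) (i j : Int) : Bool :=
  if h : i < j then
    match PySem.List.pyGet? seq i, PySem.List.pyGet? seq j with
    | some a, some b => if a ≠ b then false else pvTwoPtr seq (i + 1) (j - 1)
    | _, _ => true
  else true
termination_by (j - i).toNat
decreasing_by omega

def is_queue_palindrome_alt (queue : List Int) : Bool :=
  let seq := queue   -- queue.copy()
  pvTwoPtr seq 0 ((seq.length : Int) - 1)

-- ===== PRECONDITION & SPEC =====
def Spec_is_queue_palindrome (queue : List Int) (out : Bool) : Prop := out = is_queue_palindrome_alt queue
instance (queue : List Int) (out : Bool) : Decidable (Spec_is_queue_palindrome queue out) := by unfold Spec_is_queue_palindrome; infer_instance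

-- ===== CLAIM (what is proved, stated in full; the proofs are below) =====
def Claim_equal_is_queue_palindrome : Prop := ∀ (queue : List Int), Dom_is_queue_palindrome queue → Spec_is_queue_palindrome queue (is_queue_palindrome queue)

-- ===== LEMMAS AND PROOFS =====

theorem pv_foldl_push (xs acc : List Int) :
    xs.foldl (fun s e => s ++ [e]) acc = acc ++ xs := by
  induction xs generalizing acc with
  | nil => simp
  | cons x xs ih => simp [List.foldl, ih]

theorem pvAClimb_eq (xs : List Int) : ∀ (stack : List Int), xs.length ≤ stack.length →
    pvAClimb xs stack = decide (xs = stack.reverse.take xs.length) := by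
  induction xs with
  | nil => intro stack _; simp [pvAClimb]
  | cons x xs ih =>
    intro stack hlen
    rcases List.eq_nil_or_concat stack with rfl | ⟨init, lastv, rfl⟩
    · simp at hlen
    · simp only [List.concat_eq_append] at hlen ⊢
      have hpop : PySem.List.pop? (init ++ [lastv]) (-1) = some (lastv, init) :=
        PySem.List.pop?_last ..
      have hlen' : xs.length ≤ init.length := by
        simp at hlen; omega
      simp only [pvAClimb, hpop]
      rw [ih init hlen']
      by_cases hx : x = lastv
      · subst hx
        simp [List.take_succ_cons]
      · simp [hx]

theorem pvTwoPtr_eq (n : Nat) : ∀ (mid pre suf : List Int), mid.length = n →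
    pvTwoPtr (pre ++ mid ++ suf) (pre.length : Int) ((pre.length : Int) + mid.length - 1)
      = decide (mid = mid.reverse) := by
  induction n using Nat.strong_induction_on with
  | _ n ih =>
    intro mid pre suf hn
    by_cases hlong : 2 ≤ mid.length
    · obtain ⟨a, tl, rfl⟩ : ∃ a tl, mid = a :: tl := by
        cases mid with
        | nil => simp at hlong
        | cons a tl => exact ⟨a, tl, rfl⟩
      rcases List.eq_nil_or_concat tl with rfl | ⟨m, b, rfl⟩
      · simp at hlong
      · simp only [List.concat_eq_append] at hlong hn ⊢
        have hn' : n = m.length + 2 := by simp at hn; omega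
        have hassoc : pre ++ (a :: (m ++ [b])) ++ suf = pre ++ a :: ((m ++ [b]) ++ suf) := by simp
        have hi : PySem.List.pyGet? (pre ++ (a :: (m ++ [b])) ++ suf) (pre.length : Int) = some a := by
          rw [hassoc]; exact PySem.List.pyGet?_append_length ..
        have hjidx : ((pre.length : Int) + (a :: (m ++ [b])).length - 1)
            = (pre.length : Int) + ((m.length + 1 : Nat) : Int) := by
          simp only [List.length_cons, List.length_append, List.length_nil]; push_cast; omega
        have hj : PySem.List.pyGet? (pre ++ (a :: (m ++ [b])) ++ suf)
            ((pre.length : Int) + (a :: (m ++ [b])).length - 1) = some b := by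
          rw [hjidx, show pre ++ (a :: (m ++ [b])) ++ suf = pre ++ ((a :: (m ++ [b])) ++ suf) by simp,
              PySem.List.pyGet?_append_right]
          simp [List.getElem?_append, List.getElem?_concat_length]
        have hlt : (pre.length : Int) < (pre.length : Int) + (a :: (m ++ [b])).length - 1 := by
          simp only [List.length_cons, List.length_append, List.length_singleton]; push_cast; omega
        rw [pvTwoPtr, dif_pos hlt, hi, hj]
        dsimp only
        by_cases hab : a = b
        · subst hab
          rw [if_neg (by simp)]
          have hrec := ih m.length (by omega) m (pre ++ [a]) (a :: suf) rfl
          have key : pvTwoPtr (pre ++ (a :: (m ++ [a])) ++ suf) ((pre.length : Int) + 1)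
              ((pre.length : Int) + (a :: (m ++ [a])).length - 1 - 1) = decide (m = m.reverse) := by
            rw [← hrec]
            congr 1
            · simp
            · simp
            · simp only [List.length_cons, List.length_append, List.length_nil]; push_cast; omega
          rw [key, decide_eq_decide]
          simp
        · rw [if_pos hab]
          symm
          simp only [decide_eq_false_iff_not]
          intro hc
          rw [show (a :: (m ++ [b])).reverse = b :: (m.reverse ++ [a]) by simp] at hc
          simp only [List.cons.injEq] at hc
          exact hab hc.1
    · rw [pvTwoPtr, dif_neg (by push_cast; omega)]
      rcases mid with _ | ⟨x, _ | ⟨y, tl⟩⟩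
      · simp
      · simp
      · simp at hlong

theorem is_queue_palindrome_both (queue : List Int) :
    is_queue_palindrome queue = is_queue_palindrome_alt queue := by
  show pvAClimb queue (queue.foldl (fun s e => s ++ [e]) []) = pvTwoPtr queue 0 ((queue.length : Int) - 1)
  have hB := pvTwoPtr_eq queue.length queue [] [] rfl
  rw [pv_foldl_push, List.nil_append, pvAClimb_eq queue queue le_rfl,
      show queue.reverse.take queue.length = queue.reverse by
        rw [show queue.length = queue.reverse.length by simp, List.take_length],
      ← hB]
  congr 1 <;> simp

-- ===== VERDICT (by name: the statement is the Claim_ definition above) =====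
theorem is_queue_palindrome_spec : Claim_equal_is_queue_palindrome := by
  intro queue _
  unfold Spec_is_queue_palindrome
  exact is_queue_palindrome_both queue
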